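-- pv_equiv track=rewrite | github.com/ilanabonder/chatbot | boto.py | checkBreed
-- ===== SOURCE A (Python) =====
-- def checkBreed(user_message):
--     largeDogs = ["golden", "mutt","border","lab", "labrador", "shepard", "akita"]
--     smallDogs = [ "poodle", "shitsu"]
--     for word in user_message.split(" "):
--         if word.lower() in largeDogs:
--             return {"animation": "excited", "msg": "Omg! I love big dogs."}
--         elif word.lower() == "pug":
--             return {"animation": "giggling", "msg": "Pugs are so funny!"}
--         elif word.lower() in smallDogs:
--             return {"animation": "heartbroke", "msg": "I don't really like small dogs"}
--     return None
-- ===== SOURCE B (Python) =====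
-- _LARGE = {"animation": "excited", "msg": "Omg! I love big dogs."}
-- _PUG = {"animation": "giggling", "msg": "Pugs are so funny!"}
-- _SMALL = {"animation": "heartbroke", "msg": "I don't really like small dogs"}
-- _KEYWORDS = [
--     ("golden", _LARGE), ("mutt", _LARGE), ("border", _LARGE), ("lab", _LARGE),
--     ("labrador", _LARGE), ("shepard", _LARGE), ("akita", _LARGE),
--     ("pug", _PUG), ("poodle", _SMALL), ("shitsu", _SMALL),
-- ]
--
-- def checkBreed(user_message):
--     # Loop inversion: scan the keyword table, locate each keyword's first
--     # position among the lowered words, and answer with the response whose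
--     # keyword occurs earliest.  Keywords are pairwise distinct, so the word
--     # at the minimal index matches exactly one keyword and the result is
--     # the same as a word-major first-match scan.
--     words = [w.lower() for w in user_message.split(" ")]
--     best = None
--     for kw, resp in _KEYWORDS:
--         try:
--             i = words.index(kw)
--         except ValueError:
--             continue
--         if best is None or i < best[0]:
--             best = (i, resp)
--     return best[1] if best is not None else None
-- ===== Notes on version B (the rewrite author's own statement) =====
-- stated objective: alternative
-- what changed: Inverts the loops: instead of scanning the words and branch-testing each against keyword lists, B scans the keyword table once, finds each keyword's first index in the lowered word list (list.index), and returns the response whose keyword occurs at the minimal index; keywords are distinct so this argmin equals A's word-major first match.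
import Mathlib
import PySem

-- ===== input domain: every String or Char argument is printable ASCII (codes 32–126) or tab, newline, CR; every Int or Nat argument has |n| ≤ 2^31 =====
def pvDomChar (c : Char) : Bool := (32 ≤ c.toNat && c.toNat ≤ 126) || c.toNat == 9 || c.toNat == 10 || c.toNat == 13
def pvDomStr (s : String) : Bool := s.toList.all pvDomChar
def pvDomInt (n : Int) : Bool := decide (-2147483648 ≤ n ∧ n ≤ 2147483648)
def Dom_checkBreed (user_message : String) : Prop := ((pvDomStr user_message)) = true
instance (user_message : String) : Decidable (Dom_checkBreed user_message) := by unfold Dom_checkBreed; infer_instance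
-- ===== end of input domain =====

-- B inverts the loops (alternative): instead of scanning words and branch-testing each
-- against the keyword lists, B scans the keyword table, finds each keyword's first index
-- in the lowered word list, and returns the response whose keyword occurs earliest.

-- ===== PORT A =====
def pvLargeDogs : List String := ["golden", "mutt", "border", "lab", "labrador", "shepard", "akita"]
def pvSmallDogs : List String := ["poodle", "shitsu"]
def pvRespLarge : List (String × String) := [("animation", "excited"), ("msg", "Omg! I love big dogs.")]
def pvRespPug : List (String × String) := [("animation", "giggling"), ("msg", "Pugs are so funny!")]
def pvRespSmall : List (String × String) := [("animation", "heartbroke"), ("msg", "I don't really like small dogs")]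

def checkBreedLoopA : List String → Option (List (String × String))
  | [] => none
  | w :: ws =>
    if pvLargeDogs.contains (PySem.Str.lower w) then some pvRespLarge
    else if PySem.Str.lower w == "pug" then some pvRespPug
    else if pvSmallDogs.contains (PySem.Str.lower w) then some pvRespSmall
    else checkBreedLoopA ws

def checkBreed (user_message : String) : Option (List (String × String)) :=
  -- split(" ") with a nonempty literal separator never raises: split? is always `some` here
  match PySem.Str.split? user_message " " with
  | some ws => checkBreedLoopA ws
  | none => none

-- ===== PORT B =====
def pvKeywords : List (String × List (String × String)) :=
  [ ("golden", pvRespLarge), ("mutt", pvRespLarge), ("border", pvRespLarge),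
    ("lab", pvRespLarge), ("labrador", pvRespLarge), ("shepard", pvRespLarge),
    ("akita", pvRespLarge), ("pug", pvRespPug),
    ("poodle", pvRespSmall), ("shitsu", pvRespSmall) ]

-- one step of B's keyword loop: `try: i = words.index(kw) except ValueError: continue;
-- if best is None or i < best[0]: best = (i, resp)`
def pvStepB (words : List String) (best : Option (Nat × List (String × String)))
    (p : String × List (String × String)) : Option (Nat × List (String × String)) :=
  match PySem.List.index? words p.1 with
  | none => best
  | some i =>
    match best with
    | none => some (i, p.2)
    | some b => if i < b.1 then some (i, p.2) else best

def checkBreed_alt (user_message : String) : Option (List (String × String)) :=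
  match PySem.Str.split? user_message " " with
  | some ws =>
    let words := ws.map PySem.Str.lower
    match pvKeywords.foldl (pvStepB words) none with
    | some b => some b.2
    | none => none
  | none => none

-- ===== PRECONDITION & SPEC =====
def Spec_checkBreed (user_message : String) (out : Option (List (String × String))) : Prop := out = checkBreed_alt user_message
instance (user_message : String) (out : Option (List (String × String))) : Decidable (Spec_checkBreed user_message out) := by unfold Spec_checkBreed; infer_instance

-- ===== CLAIM (what is proved, stated in full; the proofs are below) =====
def Claim_equal_checkBreed : Prop := ∀ (user_message : String), Dom_checkBreed user_message → Spec_checkBreed user_message (checkBreed user_message)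

-- ===== LEMMAS AND PROOFS =====

-- word-major first-match over the lowered words, against the keyword table
def pvFirstHit : List String → Option (List (String × String))
  | [] => none
  | w :: ws =>
    match List.lookup w pvKeywords with
    | some r => some r
    | none => pvFirstHit ws

-- A's three-way branch on a lowered word equals a lookup in the keyword table
lemma pvBranch_eq (l : String) :
    (if pvLargeDogs.contains l then some pvRespLarge
     else if l == "pug" then some pvRespPug
     else if pvSmallDogs.contains l then some pvRespSmall
     else (none : Option (List (String × String)))) = List.lookup l pvKeywords := by
  rcases eq_or_ne l "golden" with rfl | h1; · decide
  rcases eq_or_ne l "mutt" with rfl | h2; · decide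
  rcases eq_or_ne l "border" with rfl | h3; · decide
  rcases eq_or_ne l "lab" with rfl | h4; · decide
  rcases eq_or_ne l "labrador" with rfl | h5; · decide
  rcases eq_or_ne l "shepard" with rfl | h6; · decide
  rcases eq_or_ne l "akita" with rfl | h7; · decide
  rcases eq_or_ne l "pug" with rfl | h8; · decide
  rcases eq_or_ne l "poodle" with rfl | h9; · decide
  rcases eq_or_ne l "shitsu" with rfl | h10; · decide
  simp [pvLargeDogs, pvSmallDogs, pvKeywords, List.lookup,
    beq_eq_false_iff_ne.mpr h1, beq_eq_false_iff_ne.mpr h2, beq_eq_false_iff_ne.mpr h3,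
    beq_eq_false_iff_ne.mpr h4, beq_eq_false_iff_ne.mpr h5, beq_eq_false_iff_ne.mpr h6,
    beq_eq_false_iff_ne.mpr h7, beq_eq_false_iff_ne.mpr h8, beq_eq_false_iff_ne.mpr h9,
    beq_eq_false_iff_ne.mpr h10, h1, h2, h3, h4, h5, h6, h7, h9, h10]

-- A's loop is the word-major first match on the lowered words
lemma pvLoopA_eq_firstHit (ws : List String) :
    checkBreedLoopA ws = pvFirstHit (ws.map PySem.Str.lower) := by
  induction ws with
  | nil => rfl
  | cons w ws ih =>
    simp only [checkBreedLoopA, List.map_cons, pvFirstHit, ← pvBranch_eq (PySem.Str.lower w)]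
    split_ifs <;> simp_all

-- "take the smaller index" as a pure fold step
def pvMin (best : Option (Nat × List (String × String))) (q : Nat × List (String × String)) :
    Option (Nat × List (String × String)) :=
  match best with
  | none => some q
  | some b => if q.1 < b.1 then some q else some b

-- the (index, response) pairs of the keywords occurring in `words`, in table order
def pvHits (words : List String) (KL : List (String × List (String × String))) :
    List (Nat × List (String × String)) :=
  KL.filterMap (fun p => (PySem.List.index? words p.1).map (fun i => (i, p.2)))

def pvSh (q : Nat × List (String × String)) : Nat × List (String × String) := (q.1 + 1, q.2)

lemma pvStepB_eq (words : List String) (acc : Option (Nat × List (String × String)))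
    (p : String × List (String × String)) :
    pvStepB words acc p
      = match PySem.List.index? words p.1 with
        | none => acc
        | some i => pvMin acc (i, p.2) := by
  simp only [pvStepB, pvMin, PySem.List.index?_eq_idxOf?]
  cases List.idxOf? p.1 words <;> cases acc <;> rfl

-- B's fold is the pvMin fold over the hit list
lemma pvFold_eq_minFold (words : List String) (KL : List (String × List (String × String)))
    (acc : Option (Nat × List (String × String))) :
    KL.foldl (pvStepB words) acc = (pvHits words KL).foldl pvMin acc := by
  induction KL generalizing acc with
  | nil => rfl
  | cons p KL ih =>
    simp only [pvHits] at ih ⊢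
    simp only [List.foldl_cons, List.filterMap_cons, pvStepB_eq]
    cases h : PySem.List.index? words p.1 with
    | none => simp only [Option.map_none]; exact ih acc
    | some i => simp only [Option.map_some, List.foldl_cons]; exact ih _

-- shifting every index by one commutes with the min fold
lemma pvMinFold_shift (L : List (Nat × List (String × String)))
    (acc : Option (Nat × List (String × String))) :
    (L.map pvSh).foldl pvMin (acc.map pvSh) = (L.foldl pvMin acc).map pvSh := by
  induction L generalizing acc with
  | nil => rfl
  | cons q L ih =>
    have hstep : pvMin (acc.map pvSh) (pvSh q) = (pvMin acc q).map pvSh := by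
      cases acc with
      | none => rfl
      | some b =>
        simp only [pvMin, pvSh, Option.map_some]
        by_cases h : q.1 < b.1 <;> simp [h, pvSh]
    simp only [List.map_cons, List.foldl_cons, hstep, ih]

-- a min fold over elements with index ≥ 1, from such an accumulator, yields index ≥ 1
lemma pvMinFold_ge_one (L : List (Nat × List (String × String)))
    (acc : Option (Nat × List (String × String)))
    (hL : ∀ q ∈ L, 1 ≤ q.1) (hacc : ∀ b, acc = some b → 1 ≤ b.1) :
    ∀ b, L.foldl pvMin acc = some b → 1 ≤ b.1 := by
  induction L generalizing acc with
  | nil => exact hacc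
  | cons q L ih =>
    intro b hb
    refine ih _ (fun q' hq' => hL q' (List.mem_cons_of_mem _ hq')) ?_ b hb
    intro b' hb'
    cases acc with
    | none =>
      simp only [pvMin, Option.some.injEq] at hb'
      exact hb' ▸ hL q (List.mem_cons_self ..)
    | some a =>
      simp only [pvMin] at hb'
      split_ifs at hb' with hlt
      · simp only [Option.some.injEq] at hb'
        exact hb' ▸ hL q (List.mem_cons_self ..)
      · simp only [Option.some.injEq] at hb'
        exact hb' ▸ hacc a rfl

lemma pvMinFold_zero_keeps (L : List (Nat × List (String × String)))
    (r : List (String × String)) (hL : ∀ q ∈ L, 1 ≤ q.1) :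
    L.foldl pvMin (some (0, r)) = some (0, r) := by
  induction L with
  | nil => rfl
  | cons q L ih =>
    have h1 : 1 ≤ q.1 := hL q (List.mem_cons_self ..)
    have hstep : pvMin (some (0, r)) q = some (0, r) := by
      simp only [pvMin]; rw [if_neg (by omega)]
    simp only [List.foldl_cons, hstep]
    exact ih (fun q' hq' => hL q' (List.mem_cons_of_mem _ hq'))

-- a unique zero-index hit wins the whole min fold
lemma pvMinFold_zero_wins (L1 L2 : List (Nat × List (String × String)))
    (r : List (String × String)) (h : ∀ q ∈ L1 ++ L2, 1 ≤ q.1) :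
    (L1 ++ (0, r) :: L2).foldl pvMin none = some (0, r) := by
  have h1 : ∀ q ∈ L1, 1 ≤ q.1 := fun q hq => h q (List.mem_append_left _ hq)
  have h2 : ∀ q ∈ L2, 1 ≤ q.1 := fun q hq => h q (List.mem_append_right _ hq)
  rw [List.foldl_append, List.foldl_cons]
  have hmid : pvMin (L1.foldl pvMin none) (0, r) = some (0, r) := by
    cases hacc : L1.foldl pvMin none with
    | none => rfl
    | some b =>
      have := pvMinFold_ge_one L1 none h1 (by simp) b hacc
      simp only [pvMin]; rw [if_pos (by omega)]
  rw [hmid]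
  exact pvMinFold_zero_keeps L2 r h2

-- a word that is no keyword of KL shifts every hit index by one
lemma pvHits_cons_of_ne (w : String) (ws : List String)
    (KL : List (String × List (String × String))) (hw : ∀ p ∈ KL, p.1 ≠ w) :
    pvHits (w :: ws) KL = (pvHits ws KL).map pvSh := by
  induction KL with
  | nil => rfl
  | cons p KL ih =>
    have hne : w ≠ p.1 := Ne.symm (hw p (List.mem_cons_self ..))
    have hrest := ih (fun p' hp' => hw p' (List.mem_cons_of_mem _ hp'))
    simp only [pvHits, List.filterMap_cons] at hrest ⊢
    rw [PySem.List.index?_cons_of_ne ws hne]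
    cases h : PySem.List.index? ws p.1 with
    | none => simp only [Option.map_none]; exact hrest
    | some i => simp only [Option.map_some, List.map_cons]; rw [hrest]; simp [pvSh]

-- the keyword at the head word wins: KL = K1 ++ (w, r) :: K2 with w in no other row
lemma pvKeyHit (KL K1 K2 : List (String × List (String × String)))
    (w : String) (r : List (String × String)) (ws : List String)
    (hKL : KL = K1 ++ (w, r) :: K2) (hw : ∀ p ∈ K1 ++ K2, p.1 ≠ w) :
    (pvHits (w :: ws) KL).foldl pvMin none = some (0, r) := by
  subst hKL
  have hK1 : ∀ p ∈ K1, p.1 ≠ w := fun p hp => hw p (List.mem_append_left _ hp)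
  have hK2 : ∀ p ∈ K2, p.1 ≠ w := fun p hp => hw p (List.mem_append_right _ hp)
  have e1 := pvHits_cons_of_ne w ws K1 hK1
  have e2 := pvHits_cons_of_ne w ws K2 hK2
  have hsplit : pvHits (w :: ws) (K1 ++ (w, r) :: K2)
      = (pvHits ws K1).map pvSh ++ (0, r) :: (pvHits ws K2).map pvSh := by
    simp only [pvHits, List.filterMap_append, List.filterMap_cons,
      PySem.List.index?_cons_self, Option.map_some] at e1 e2 ⊢
    rw [e1, e2]
  rw [hsplit]
  apply pvMinFold_zero_wins
  intro q hq
  rcases List.mem_append.mp hq with h | h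
  · rcases List.mem_map.mp h with ⟨q', -, rfl⟩; simp [pvSh]
  · rcases List.mem_map.mp h with ⟨q', -, rfl⟩; simp [pvSh]

-- B's keyword-major min fold computes the word-major first match
lemma pvMain (ls : List String) :
    ((pvHits ls pvKeywords).foldl pvMin none).map (·.2) = pvFirstHit ls := by
  induction ls with
  | nil => rfl
  | cons w ws ih =>
    rcases eq_or_ne w "golden" with rfl | h1
    · rw [pvKeyHit pvKeywords []
        [("mutt", pvRespLarge), ("border", pvRespLarge), ("lab", pvRespLarge), ("labrador", pvRespLarge), ("shepard", pvRespLarge), ("akita", pvRespLarge), ("pug", pvRespPug), ("poodle", pvRespSmall), ("shitsu", pvRespSmall)]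
        "golden" pvRespLarge ws rfl (by decide)]
      rfl
    rcases eq_or_ne w "mutt" with rfl | h2
    · rw [pvKeyHit pvKeywords [("golden", pvRespLarge)]
        [("border", pvRespLarge), ("lab", pvRespLarge), ("labrador", pvRespLarge), ("shepard", pvRespLarge), ("akita", pvRespLarge), ("pug", pvRespPug), ("poodle", pvRespSmall), ("shitsu", pvRespSmall)]
        "mutt" pvRespLarge ws rfl (by decide)]
      rfl
    rcases eq_or_ne w "border" with rfl | h3
    · rw [pvKeyHit pvKeywords [("golden", pvRespLarge), ("mutt", pvRespLarge)]
        [("lab", pvRespLarge), ("labrador", pvRespLarge), ("shepard", pvRespLarge), ("akita", pvRespLarge), ("pug", pvRespPug), ("poodle", pvRespSmall), ("shitsu", pvRespSmall)]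
        "border" pvRespLarge ws rfl (by decide)]
      rfl
    rcases eq_or_ne w "lab" with rfl | h4
    · rw [pvKeyHit pvKeywords [("golden", pvRespLarge), ("mutt", pvRespLarge), ("border", pvRespLarge)]
        [("labrador", pvRespLarge), ("shepard", pvRespLarge), ("akita", pvRespLarge), ("pug", pvRespPug), ("poodle", pvRespSmall), ("shitsu", pvRespSmall)]
        "lab" pvRespLarge ws rfl (by decide)]
      rfl
    rcases eq_or_ne w "labrador" with rfl | h5
    · rw [pvKeyHit pvKeywords [("golden", pvRespLarge), ("mutt", pvRespLarge), ("border", pvRespLarge), ("lab", pvRespLarge)]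
        [("shepard", pvRespLarge), ("akita", pvRespLarge), ("pug", pvRespPug), ("poodle", pvRespSmall), ("shitsu", pvRespSmall)]
        "labrador" pvRespLarge ws rfl (by decide)]
      rfl
    rcases eq_or_ne w "shepard" with rfl | h6
    · rw [pvKeyHit pvKeywords [("golden", pvRespLarge), ("mutt", pvRespLarge), ("border", pvRespLarge), ("lab", pvRespLarge), ("labrador", pvRespLarge)]
        [("akita", pvRespLarge), ("pug", pvRespPug), ("poodle", pvRespSmall), ("shitsu", pvRespSmall)]
        "shepard" pvRespLarge ws rfl (by decide)]
      rfl
    rcases eq_or_ne w "akita" with rfl | h7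
    · rw [pvKeyHit pvKeywords [("golden", pvRespLarge), ("mutt", pvRespLarge), ("border", pvRespLarge), ("lab", pvRespLarge), ("labrador", pvRespLarge), ("shepard", pvRespLarge)]
        [("pug", pvRespPug), ("poodle", pvRespSmall), ("shitsu", pvRespSmall)]
        "akita" pvRespLarge ws rfl (by decide)]
      rfl
    rcases eq_or_ne w "pug" with rfl | h8
    · rw [pvKeyHit pvKeywords [("golden", pvRespLarge), ("mutt", pvRespLarge), ("border", pvRespLarge), ("lab", pvRespLarge), ("labrador", pvRespLarge), ("shepard", pvRespLarge), ("akita", pvRespLarge)]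
        [("poodle", pvRespSmall), ("shitsu", pvRespSmall)]
        "pug" pvRespPug ws rfl (by decide)]
      rfl
    rcases eq_or_ne w "poodle" with rfl | h9
    · rw [pvKeyHit pvKeywords [("golden", pvRespLarge), ("mutt", pvRespLarge), ("border", pvRespLarge), ("lab", pvRespLarge), ("labrador", pvRespLarge), ("shepard", pvRespLarge), ("akita", pvRespLarge), ("pug", pvRespPug)]
        [("shitsu", pvRespSmall)]
        "poodle" pvRespSmall ws rfl (by decide)]
      rfl
    rcases eq_or_ne w "shitsu" with rfl | h10
    · rw [pvKeyHit pvKeywords [("golden", pvRespLarge), ("mutt", pvRespLarge), ("border", pvRespLarge), ("lab", pvRespLarge), ("labrador", pvRespLarge), ("shepard", pvRespLarge), ("akita", pvRespLarge), ("pug", pvRespPug), ("poodle", pvRespSmall)]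
        []
        "shitsu" pvRespSmall ws rfl (by decide)]
      rfl
    -- w is no keyword: the head word contributes no hit, every index shifts by one
    have hno : ∀ p ∈ pvKeywords, p.1 ≠ w := by
      intro p hp
      simp only [pvKeywords, List.mem_cons, List.not_mem_nil, or_false] at hp
      rcases hp with rfl|rfl|rfl|rfl|rfl|rfl|rfl|rfl|rfl|rfl <;>
        (intro hh; exact absurd hh.symm (by assumption))
    have hlk : List.lookup w pvKeywords = none := by
      simp [pvKeywords, List.lookup,
        beq_eq_false_iff_ne.mpr h1, beq_eq_false_iff_ne.mpr h2, beq_eq_false_iff_ne.mpr h3,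
        beq_eq_false_iff_ne.mpr h4, beq_eq_false_iff_ne.mpr h5, beq_eq_false_iff_ne.mpr h6,
        beq_eq_false_iff_ne.mpr h7, beq_eq_false_iff_ne.mpr h8, beq_eq_false_iff_ne.mpr h9,
        beq_eq_false_iff_ne.mpr h10]
    have hrhs : pvFirstHit (w :: ws) = pvFirstHit ws := by
      simp [pvFirstHit, hlk]
    rw [pvHits_cons_of_ne w ws pvKeywords hno, hrhs]
    have hshift := pvMinFold_shift (pvHits ws pvKeywords) none
    simp only [Option.map_none] at hshift
    rw [hshift, ← ih]
    cases (pvHits ws pvKeywords).foldl pvMin none <;> simp [pvSh]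

-- ===== VERDICT (by name: the statement is the Claim_ definition above) =====
theorem checkBreed_spec : Claim_equal_checkBreed := by
  intro s _
  unfold Spec_checkBreed checkBreed checkBreed_alt
  cases PySem.Str.split? s " " with
  | none => rfl
  | some ws =>
    simp only
    rw [pvLoopA_eq_firstHit, ← pvMain (ws.map PySem.Str.lower),
      ← pvFold_eq_minFold (ws.map PySem.Str.lower) pvKeywords none]
    cases pvKeywords.foldl (pvStepB (ws.map PySem.Str.lower)) none <;> rfl
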